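-- pv_equiv track=rewrite | github.com/burning-calamity/extirpation | online/disrupted_transposition.py | disrupted_transposition_encrypt
-- ===== SOURCE A (Python) =====
-- def _key_order(key: str) -> list[int]:
--     return sorted(range(len(key)), key=lambda i: (key[i], i))
--
-- def disrupted_transposition_encrypt(plaintext: str, key: str) -> str:
--     """Encrypt by reversing every other row before column readout."""
--     if not key:
--         raise ValueError('key must not be empty')
--
--     cols = len(key)
--     rows = (len(plaintext) + cols - 1) // cols
--     grid = [['' for _ in range(cols)] for _ in range(rows)]
--
--     idx = 0
--     for r in range(rows):
--         order = range(cols) if r % 2 == 0 else range(cols - 1, -1, -1)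
--         for c in order:
--             if idx < len(plaintext):
--                 grid[r][c] = plaintext[idx]
--                 idx += 1
--
--     out: list[str] = []
--     for c in _key_order(key):
--         for r in range(rows):
--             if grid[r][c]:
--                 out.append(grid[r][c])
--     return ''.join(out)
-- ===== SOURCE B (Python) =====
-- def _key_order(key: str) -> list[int]:
--     return sorted(range(len(key)), key=lambda i: (key[i], i))
--
-- def disrupted_transposition_encrypt(plaintext: str, key: str) -> str:
--     """Encrypt by computing each column's plaintext indices in closed form."""
--     if not key:
--         raise ValueError('key must not be empty')
--     cols = len(key)
--     n = len(plaintext)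
--     rows = (n + cols - 1) // cols
--     out: list[str] = []
--     for c in _key_order(key):
--         for r in range(rows):
--             i = r * cols + (c if r % 2 == 0 else cols - 1 - c)
--             if i < n:
--                 out.append(plaintext[i])
--     return ''.join(out)
-- ===== Notes on version B (the rewrite author's own statement) =====
-- stated objective: simpler
-- what changed: B builds no grid and makes no fill pass at all: for each key-ordered column it computes every cell's plaintext index in closed form (i = r*cols + (c if r%2==0 else cols-1-c)) and reads the character straight out of the plaintext, whereas A simulates the snake fill into a 2D grid and then reads it back.
import Mathlib
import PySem

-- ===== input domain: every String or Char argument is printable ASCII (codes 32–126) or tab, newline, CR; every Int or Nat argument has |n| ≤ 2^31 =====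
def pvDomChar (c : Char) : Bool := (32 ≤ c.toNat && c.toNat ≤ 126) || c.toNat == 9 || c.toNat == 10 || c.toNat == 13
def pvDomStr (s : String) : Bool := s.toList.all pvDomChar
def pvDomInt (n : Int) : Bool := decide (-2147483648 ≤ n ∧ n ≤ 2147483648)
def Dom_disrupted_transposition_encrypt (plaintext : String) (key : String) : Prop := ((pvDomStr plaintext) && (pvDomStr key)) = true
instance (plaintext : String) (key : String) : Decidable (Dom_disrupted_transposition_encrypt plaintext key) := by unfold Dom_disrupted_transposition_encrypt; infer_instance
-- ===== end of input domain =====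

-- B replaces A's grid simulation by closed-form index arithmetic (simpler; same results).

-- ===== PORT A =====
-- _key_order(key) = sorted(range(len(key)), key=lambda i: (key[i], i)); shared verbatim by A and B.
def pvKeyOrder (kl : List Char) : List Nat :=
  PySem.List.sorted2 (List.range kl.length) (fun i => kl.getD i ' ') (fun i => i) false

-- Literal port of A: build a rows×cols grid of cells ('' modelled as none), fill it
-- snake-wise (odd rows right-to-left, 'range(cols-1,-1,-1)' = the reversed range), then
-- read columns in key order skipping empty cells.  All arithmetic is on non-negative
-- numbers, so Python's '//' is Nat division.
def disrupted_transposition_encrypt (plaintext : String) (key : String) : String :=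
  let pt := plaintext.toList
  let kl := key.toList
  let cols := kl.length
  let rows := (pt.length + cols - 1) / cols
  let grid0 : List (List (Option Char)) := List.replicate rows (List.replicate cols none)
  let fill := (List.range rows).foldl (fun (st : List (List (Option Char)) × Nat) r =>
      let order := if r % 2 = 0 then List.range cols else (List.range cols).reverse
      order.foldl (fun st c =>
        if st.2 < pt.length then
          (st.1.set r ((st.1.getD r []).set c (some (pt.getD st.2 ' '))), st.2 + 1)
        else st) st) (grid0, 0)
  let grid := fill.1
  let out := (pvKeyOrder kl).foldl (fun out c =>
      (List.range rows).foldl (fun out r =>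
        match (grid.getD r []).getD c none with
        | some ch => out ++ [ch]
        | none => out) out) ([] : List Char)
  String.ofList out

-- ===== PORT B =====
-- Literal port of B: no grid — for c in key order and r in range(rows), the plaintext
-- index is computed in closed form i = r*cols + (c if r%2==0 else cols-1-c); append
-- plaintext[i] whenever i < n.
def disrupted_transposition_encrypt_alt (plaintext : String) (key : String) : String :=
  let pt := plaintext.toList
  let kl := key.toList
  let cols := kl.length
  let n := pt.length
  let rows := (n + cols - 1) / cols
  let out := (pvKeyOrder kl).foldl (fun out c =>
      (List.range rows).foldl (fun out r =>
        let i := r * cols + (if r % 2 = 0 then c else cols - 1 - c)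
        if i < n then out ++ [pt.getD i ' '] else out) out) ([] : List Char)
  String.ofList out

-- ===== PRECONDITION & SPEC =====
-- Pre_ excludes only the empty key, on which A raises ValueError (B raises too).
def Pre_disrupted_transposition_encrypt (plaintext : String) (key : String) : Prop := key ≠ ""
instance (plaintext : String) (key : String) : Decidable (Pre_disrupted_transposition_encrypt plaintext key) := by unfold Pre_disrupted_transposition_encrypt; infer_instance
def pvWitness_disrupted_transposition_encrypt : String × String := ("HELLOWORLDX", "KEY")

def Spec_disrupted_transposition_encrypt (plaintext : String) (key : String) (out : String) : Prop := out = disrupted_transposition_encrypt_alt plaintext key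
instance (plaintext : String) (key : String) (out : String) : Decidable (Spec_disrupted_transposition_encrypt plaintext key out) := by unfold Spec_disrupted_transposition_encrypt; infer_instance

-- ===== CLAIM (what is proved, stated in full; the proofs are below) =====
def Claim_equal_disrupted_transposition_encrypt : Prop := ∀ (plaintext : String) (key : String), Dom_disrupted_transposition_encrypt plaintext key → Pre_disrupted_transposition_encrypt plaintext key → Spec_disrupted_transposition_encrypt plaintext key (disrupted_transposition_encrypt plaintext key)


-- ===== LEMMAS AND PROOFS =====

-- position of column c within row r's snake order (= index at which the fill loop visits c)
def pvPos (cols r c : Nat) : Nat := if r % 2 = 0 then c else cols - 1 - c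
-- the plaintext index stored at grid cell (r, c)
def pvT (cols c r : Nat) : Nat := r * cols + pvPos cols r c
-- the final contents of grid cell (r, c)
def pvCell (pt : List Char) (cols r c : Nat) : Option Char :=
  if pvT cols c r < pt.length then some (pt.getD (pvT cols c r) ' ') else none
-- visiting order of row r
def pvOrder (cols r : Nat) : List Nat :=
  if r % 2 = 0 then List.range cols else (List.range cols).reverse
-- row-local fill step
def pvRowStep (pt : List Char) (st : List (Option Char) × Nat) (c : Nat) : List (Option Char) × Nat :=
  if st.2 < pt.length then (st.1.set c (some (pt.getD st.2 ' ')), st.2 + 1) else st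
-- final contents of row r
def pvRow (pt : List Char) (cols r : Nat) : List (Option Char) :=
  ((pvOrder cols r).foldl (pvRowStep pt) (List.replicate cols none, r * cols)).1
-- the grid after the first k rows have been filled
def pvG (pt : List Char) (cols k : Nat) : List (List (Option Char)) :=
  (List.range ((pt.length + cols - 1) / cols)).map
    (fun r => if r < k then pvRow pt cols r else List.replicate cols none)

lemma pv_rows_lt (n cols k : Nat) (hc : 0 < cols) (hk : k < (n + cols - 1) / cols) :
    k * cols < n := by
  have h := Nat.div_add_mod (n + cols - 1) cols
  have hm : (n + cols - 1) % cols < cols := Nat.mod_lt _ hc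
  have h2 : (k + 1) * cols ≤ ((n + cols - 1) / cols) * cols := Nat.mul_le_mul_right _ hk
  rw [add_mul, one_mul] at h2
  rw [mul_comm] at h
  omega

lemma pv_order_nodup (cols r : Nat) : (pvOrder cols r).Nodup := by
  unfold pvOrder; split
  · exact List.nodup_range
  · exact List.nodup_reverse.mpr List.nodup_range

lemma pv_order_length (cols r : Nat) : (pvOrder cols r).length = cols := by
  unfold pvOrder; split <;> simp

lemma pv_order_mem (cols r c : Nat) : c ∈ pvOrder cols r ↔ c < cols := by
  unfold pvOrder; split <;> simp

lemma pv_order_idxOf (cols r c : Nat) (hc : c < cols) :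
    (pvOrder cols r).idxOf c = pvPos cols r c := by
  unfold pvOrder pvPos; split
  · have h : (List.range cols)[c]'(by simp [hc]) = c := by simp
    conv_lhs => rw [← h]
    exact List.Nodup.idxOf_getElem List.nodup_range c (by simp [hc])
  · have hj : cols - 1 - c < ((List.range cols).reverse).length := by simp; omega
    have h : ((List.range cols).reverse)[cols - 1 - c]'hj = c := by
      rw [List.getElem_reverse]
      simp only [List.length_range, List.getElem_range]
      omega
    have h2 := List.Nodup.idxOf_getElem (List.nodup_reverse.mpr List.nodup_range)
      (cols - 1 - c) hj
    rw [h] at h2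
    exact h2

-- characterisation of one row's fill loop
lemma pv_rowfold (pt : List Char) :
    ∀ (order : List Nat) (row : List (Option Char)) (idx : Nat), order.Nodup →
      (order.foldl (pvRowStep pt) (row, idx)).2 = idx + min order.length (pt.length - idx) ∧
      ∀ c, c < row.length →
        (order.foldl (pvRowStep pt) (row, idx)).1.getD c none =
          (if c ∈ order ∧ idx + order.idxOf c < pt.length
            then some (pt.getD (idx + order.idxOf c) ' ') else row.getD c none) := by
  intro order
  induction order with
  | nil =>
    intro row idx _
    refine ⟨by simp, ?_⟩
    intro c _
    simp
  | cons c0 t ih =>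
    intro row idx hnd
    rw [List.nodup_cons] at hnd
    obtain ⟨hc0, hndt⟩ := hnd
    by_cases hidx : idx < pt.length
    · have hstep : pvRowStep pt (row, idx) c0 = (row.set c0 (some (pt.getD idx ' ')), idx + 1) := by
        simp [pvRowStep, hidx]
      rw [List.foldl_cons, hstep]
      obtain ⟨h2, h1⟩ := ih (row.set c0 (some (pt.getD idx ' '))) (idx + 1) hndt
      constructor
      · rw [h2]
        simp only [List.length_cons]
        omega
      · intro c hcl
        rw [h1 c (by simpa using hcl)]
        by_cases hcc : c = c0
        · subst hcc
          rw [if_neg (by simp [hc0]), List.idxOf_cons_self]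
          rw [if_pos (by simp [hidx])]
          simp [List.getD_eq_getElem?_getD, hcl]
        · have hio : (c0 :: t).idxOf c = t.idxOf c + 1 := by
            simp [Ne.symm hcc]
          have hmem : c ∈ c0 :: t ↔ c ∈ t := by simp [hcc]
          have hgd : (row.set c0 (some (pt.getD idx ' '))).getD c none = row.getD c none := by
            simp [List.getD_eq_getElem?_getD, List.getElem?_set_ne (Ne.symm hcc)]
          rw [hgd, hio]
          have harith : idx + 1 + t.idxOf c = idx + (t.idxOf c + 1) := by omega
          rw [harith]
          simp only [hmem]
    · have hstep : pvRowStep pt (row, idx) c0 = (row, idx) := by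
        simp [pvRowStep, hidx]
      rw [List.foldl_cons, hstep]
      obtain ⟨h2, h1⟩ := ih row idx hndt
      constructor
      · rw [h2]
        simp only [List.length_cons]
        omega
      · intro c hcl
        rw [h1 c hcl]
        split_ifs with ha hb hb
        · omega
        · omega
        · omega
        · rfl

-- the grid-level inner loop only rewrites row r
lemma pv_inner (pt : List Char) (r : Nat) :
    ∀ (order : List Nat) (g : List (List (Option Char))) (idx : Nat), r < g.length →
      order.foldl (fun st c => if st.2 < pt.length
          then (st.1.set r ((st.1.getD r []).set c (some (pt.getD st.2 ' '))), st.2 + 1)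
          else st) (g, idx)
        = (g.set r (order.foldl (pvRowStep pt) (g.getD r [], idx)).1,
           (order.foldl (pvRowStep pt) (g.getD r [], idx)).2) := by
  intro order
  induction order with
  | nil =>
    intro g idx hr
    simp only [List.foldl_nil]
    rw [List.getD_eq_getElem?_getD, List.getElem?_eq_getElem hr]
    simp [List.set_getElem_self]
  | cons c0 t ih =>
    intro g idx hr
    simp only [List.foldl_cons]
    by_cases hidx : idx < pt.length
    · rw [if_pos hidx]
      have hr' : r < (g.set r ((g.getD r []).set c0 (some (pt.getD idx ' ')))).length := by
        simpa using hr
      rw [ih _ _ hr']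
      have hgd : (g.set r ((g.getD r []).set c0 (some (pt.getD idx ' ')))).getD r []
          = (g.getD r []).set c0 (some (pt.getD idx ' ')) := by
        simp [List.getD_eq_getElem?_getD, hr]
      rw [hgd, List.set_set]
      have hstep : pvRowStep pt (g.getD r [], idx) c0
          = ((g.getD r []).set c0 (some (pt.getD idx ' ')), idx + 1) := by
        simp [pvRowStep, hidx]
      rw [hstep]
    · rw [if_neg hidx, ih _ _ hr]
      have hstep : pvRowStep pt (g.getD r [], idx) c0 = (g.getD r [], idx) := by
        simp [pvRowStep, hidx]
      rw [hstep]

-- the outer fill loop, row by row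
lemma pv_outer (pt : List Char) (cols : Nat) (hc : 0 < cols) :
    ∀ k, k ≤ (pt.length + cols - 1) / cols →
      (List.range k).foldl (fun (st : List (List (Option Char)) × Nat) r =>
          (if r % 2 = 0 then List.range cols else (List.range cols).reverse).foldl
            (fun st c => if st.2 < pt.length
              then (st.1.set r ((st.1.getD r []).set c (some (pt.getD st.2 ' '))), st.2 + 1)
              else st) st)
        (List.replicate ((pt.length + cols - 1) / cols) (List.replicate cols none), 0)
      = (pvG pt cols k, min (k * cols) pt.length) := by
  intro k
  induction k with
  | zero =>
    intro _
    simp [pvG, List.map_const']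
  | succ k ih =>
    intro hk
    rw [List.range_succ, List.foldl_append, ih (by omega), List.foldl_cons, List.foldl_nil]
    have hklt : k < (pt.length + cols - 1) / cols := hk
    have hkn : k * cols < pt.length := pv_rows_lt pt.length cols k hc hklt
    have hmin : min (k * cols) pt.length = k * cols := Nat.min_eq_left (le_of_lt hkn)
    rw [hmin]
    have hglen : k < (pvG pt cols k).length := by simp [pvG]; omega
    rw [pv_inner pt k _ _ _ hglen]
    have hgd : (pvG pt cols k).getD k [] = List.replicate cols none := by
      rw [List.getD_eq_getElem?_getD, List.getElem?_eq_getElem hglen]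
      simp [pvG]
    rw [hgd]
    have hord : (if k % 2 = 0 then List.range cols else (List.range cols).reverse) = pvOrder cols k := rfl
    rw [hord]
    obtain ⟨h2, _⟩ := pv_rowfold pt (pvOrder cols k) (List.replicate cols none) (k * cols)
      (pv_order_nodup cols k)
    rw [Prod.mk.injEq]
    constructor
    · -- grid component
      show (pvG pt cols k).set k (pvRow pt cols k) = pvG pt cols (k + 1)
      apply List.ext_getElem
      · simp [pvG]
      · intro i h1 h2
        have hi : i < (pt.length + cols - 1) / cols := by
          simpa [pvG] using h2
        rw [List.getElem_set]
        simp only [pvG, List.getElem_map, List.getElem_range]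
        split_ifs with hik h3 h4 h4 <;> first
          | rfl
          | (subst hik; rfl)
          | omega
    · -- index component
      rw [h2, pv_order_length]
      rw [add_mul, one_mul]
      omega

-- final cell values
lemma pv_cell_char (pt : List Char) (cols r c : Nat) (hc : 0 < cols)
    (hr : r < (pt.length + cols - 1) / cols) (hcc : c < cols) :
    ((pvG pt cols ((pt.length + cols - 1) / cols)).getD r []).getD c none = pvCell pt cols r c := by
  have hlen : r < (pvG pt cols ((pt.length + cols - 1) / cols)).length := by simp [pvG, hr]
  have h1 : (pvG pt cols ((pt.length + cols - 1) / cols)).getD r [] = pvRow pt cols r := by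
    rw [List.getD_eq_getElem?_getD, List.getElem?_eq_getElem hlen]
    simp [pvG, hr]
  rw [h1]
  obtain ⟨_, h2⟩ := pv_rowfold pt (pvOrder cols r) (List.replicate cols none) (r * cols)
    (pv_order_nodup cols r)
  rw [pvRow, h2 c (by simp [hcc]), pv_order_idxOf cols r c hcc]
  simp only [pv_order_mem, pvCell, pvT, hcc, true_and]
  split_ifs with h
  · rfl
  · simp

lemma pv_keyOrder_mem (kl : List Char) (c : Nat) (hm : c ∈ pvKeyOrder kl) : c < kl.length := by
  have := (PySem.List.sorted2_perm (List.range kl.length)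
    (fun i => kl.getD i ' ') (fun i => i) false).mem_iff (a := c)
  rw [pvKeyOrder] at hm
  rw [this] at hm
  exact List.mem_range.mp hm


-- ===== VERDICT (by name: the statement is the Claim_ definition above) =====
theorem disrupted_transposition_encrypt_spec : Claim_equal_disrupted_transposition_encrypt := by
  intro plaintext key _ hpre
  have hk : 0 < key.toList.length := by
    rw [List.length_pos_iff]
    intro h
    exact hpre (by rwa [String.toList_eq_nil_iff] at h)
  unfold Spec_disrupted_transposition_encrypt
  simp only [disrupted_transposition_encrypt, disrupted_transposition_encrypt_alt]
  rw [pv_outer plaintext.toList key.toList.length hk _ le_rfl]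
  congr 1
  apply PySem.List.foldl_congr_mem
  intro acc c hcm
  have hcc := pv_keyOrder_mem key.toList c hcm
  apply PySem.List.foldl_congr_mem
  intro acc' r hrm
  have hr := List.mem_range.mp hrm
  rw [pv_cell_char plaintext.toList key.toList.length r c hk hr hcc]
  simp only [pvCell, pvT, pvPos]
  split_ifs <;> rfl
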